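-- pv_equiv track=rewrite | github.com/Strzelacz48/Semestr4Uwr | AI/L1/Z4L1.py | f
-- ===== SOURCE A (Python) =====
-- def f(table, D):
--     it = 0
--     ones = 0
--     while(D > 0 and it < len(table) and table[it]!= '1' ):
--         it += 1
--
--     while(D > ones and it < len(table) and table[it] == '1'):
--         ones += 1
--         it += 1
--
--     while(it < len(table)):
--         if(table[it] == '1'):
--             return False
--         it += 1
--     if(D == ones):
--         return True
--     return False
-- ===== SOURCE B (Python) =====
-- def f(table, D):
--     pos = [i for i, c in enumerate(table) if c == '1']
--     count = len(pos)
--     if count != D: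
--         return False
--     if count == 0:
--         return True
--     return pos[-1] - pos[0] + 1 == count
-- ===== Notes on version B (the rewrite author's own statement) =====
-- stated objective: simpler
-- what changed: Replaced A's three sequential index-walking while-loops (skip prefix, consume a run of ones, scan the tail) by one comprehension collecting the positions of '1' followed by a count-and-endpoint arithmetic contiguity test.
import Mathlib
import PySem

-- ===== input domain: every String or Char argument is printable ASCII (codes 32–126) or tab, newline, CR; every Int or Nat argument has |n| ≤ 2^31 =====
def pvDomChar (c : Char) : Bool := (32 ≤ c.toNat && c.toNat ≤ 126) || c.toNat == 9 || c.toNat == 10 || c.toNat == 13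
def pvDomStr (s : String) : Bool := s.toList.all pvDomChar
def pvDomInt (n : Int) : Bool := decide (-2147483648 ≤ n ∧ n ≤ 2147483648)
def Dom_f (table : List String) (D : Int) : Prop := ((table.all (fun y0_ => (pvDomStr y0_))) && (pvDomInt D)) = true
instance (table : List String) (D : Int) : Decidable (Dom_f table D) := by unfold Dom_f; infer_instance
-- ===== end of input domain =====

-- B replaces A's three sequential index-walking while-loops by collecting the positions of
-- '1' once and testing count and contiguity arithmetically (objective: simpler).

-- ===== PORT A =====
-- first while loop: skip leading non-'1' entries (only while D > 0)
def fLoop1 (table : List String) (D : Int) (it : Nat) : Nat :=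
  if h : 0 < D ∧ it < table.length ∧ ¬ table.getD it "" = "1" then
    fLoop1 table D (it + 1)
  else it
termination_by table.length - it
decreasing_by omega

-- second while loop: consume '1's while ones < D
def fLoop2 (table : List String) (D : Int) (it : Nat) (ones : Int) : Nat × Int :=
  if h : ones < D ∧ it < table.length ∧ table.getD it "" = "1" then
    fLoop2 table D (it + 1) (ones + 1)
  else (it, ones)
termination_by table.length - it
decreasing_by omega

-- third while loop: any further '1' means False; then compare D with ones
def fLoop3 (table : List String) (D : Int) (it : Nat) (ones : Int) : Bool :=
  if h : it < table.length then
    if table.getD it "" = "1" then false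
    else fLoop3 table D (it + 1) ones
  else D == ones
termination_by table.length - it
decreasing_by omega

def f (table : List String) (D : Int) : Bool :=
  let it1 := fLoop1 table D 0
  let r := fLoop2 table D it1 0
  fLoop3 table D r.1 r.2

-- ===== PORT B =====
def f_alt (table : List String) (D : Int) : Bool :=
  let pos := (List.range table.length).filter (fun i => table.getD i "" == "1")
  let count := pos.length
  if (count : Int) ≠ D then false
  else if count = 0 then true
  else pos.getLast! - pos.head! + 1 == count

-- ===== PRECONDITION & SPEC =====
def Spec_f (table : List String) (D : Int) (out : Bool) : Prop := out = f_alt table D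
instance (table : List String) (D : Int) (out : Bool) : Decidable (Spec_f table D out) := by unfold Spec_f; infer_instance

-- ===== CLAIM (what is proved, stated in full; the proofs are below) =====
def Claim_equal_f : Prop := ∀ (table : List String) (D : Int), Dom_f table D → Spec_f table D (f table D)

-- ===== LEMMAS AND PROOFS =====

-- positions of "1" in a list, structurally
def posIdx : List String → List Nat
  | [] => []
  | x :: xs => (if x = "1" then [0] else []) ++ (posIdx xs).map (· + 1)

theorem posIdx_filter_range (table : List String) :
    (List.range table.length).filter (fun i => table.getD i "" == "1") = posIdx table := by
  induction table with
  | nil => simp [posIdx]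
  | cons x xs ih =>
    have h1 : (fun i => (x :: xs).getD i "" == "1") ∘ Nat.succ
        = (fun i => xs.getD i "" == "1") := by
      funext i; rfl
    rw [List.length_cons, List.range_succ_eq_map, List.filter_cons, List.filter_map, h1, ih]
    by_cases hx : x = "1" <;> simp [posIdx, hx, List.getD]

theorem posIdx_append (l1 l2 : List String) :
    posIdx (l1 ++ l2) = posIdx l1 ++ (posIdx l2).map (· + l1.length) := by
  induction l1 with
  | nil => simp [posIdx]
  | cons x xs ih =>
    simp only [List.cons_append, posIdx, ih, List.map_append, List.map_map,
      List.length_cons, List.append_assoc]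
    congr 2

theorem posIdx_replicate (b : Nat) : posIdx (List.replicate b "1") = List.range b := by
  induction b with
  | zero => simp [posIdx]
  | succ n ih =>
    rw [List.replicate_succ, List.range_succ_eq_map]
    simp [posIdx, ih]

theorem posIdx_nil_iff (l : List String) :
    posIdx l = [] ↔ l.all (fun s => !(s == "1")) = true := by
  induction l with
  | nil => simp [posIdx]
  | cons x xs ih =>
    by_cases hx : x = "1" <;> simp [posIdx, hx, ih]

theorem posIdx_pairwise (l : List String) : (posIdx l).Pairwise (· < ·) := by
  induction l with
  | nil => simp [posIdx]
  | cons x xs ih =>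
    have hmap : ((posIdx xs).map (· + 1)).Pairwise (· < ·) := by
      rw [List.pairwise_map]; exact ih.imp (by omega)
    by_cases hx : x = "1"
    · simp only [posIdx, if_pos hx, List.singleton_append]
      refine List.pairwise_cons.mpr ⟨?_, hmap⟩
      intro a ha
      rw [List.mem_map] at ha
      obtain ⟨b, _, hb⟩ := ha; omega
    · simp only [posIdx, if_neg hx, List.nil_append]; exact hmap

theorem chain_last (q : List Nat) : ∀ (x : Nat), (x :: q).Pairwise (· < ·) →
    x + q.length ≤ (x :: q).getLast (List.cons_ne_nil x q) := by
  induction q with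
  | nil => intro x _; simp
  | cons y t ih =>
    intro x hp
    have hxy : x < y := (List.pairwise_cons.mp hp).1 y (by simp)
    have hp' : (y :: t).Pairwise (· < ·) := (List.pairwise_cons.mp hp).2
    have := ih y hp'
    rw [List.getLast_cons (List.cons_ne_nil y t)]
    simp only [List.length_cons]
    omega

theorem getLast!_concat (l : List Nat) (a : Nat) : (l ++ [a]).getLast! = a := by
  induction l with
  | nil => rfl
  | cons x xs ih =>
    cases xs with
    | nil => rfl
    | cons y t => simpa [List.getLast!, List.getLast] using ih

-- closed forms for A's three loops
theorem loop1_eq (table : List String) (D : Int) (it : Nat) :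
    fLoop1 table D it =
      if 0 < D then it + ((table.drop it).takeWhile (fun s => !(s == "1"))).length else it := by
  fun_induction fLoop1 table D it with
  | case1 it h ih =>
    obtain ⟨hD, hlt, hne⟩ := h
    rw [ih]
    rw [List.getD_eq_getElem table "" hlt] at hne
    have hne' : (table[it] == "1") = false := by simpa using hne
    rw [List.drop_eq_getElem_cons hlt, List.takeWhile_cons, hne']
    simp only [Bool.not_false, if_true, List.length_cons, if_pos hD]
    omega
  | case2 it h =>
    by_cases hD : 0 < D
    · simp only [if_pos hD]
      by_cases hlt : it < table.length
      · have hx : table.getD it "" = "1" := by tauto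
        rw [List.getD_eq_getElem table "" hlt] at hx
        have hx' : (table[it] == "1") = true := by simpa using hx
        rw [List.drop_eq_getElem_cons hlt, List.takeWhile_cons, hx']
        simp
      · rw [List.drop_eq_nil_iff.mpr (by omega)]
        simp
    · simp [hD]

theorem loop2_eq (table : List String) (D : Int) (it : Nat) (ones : Int) :
    fLoop2 table D it ones =
      (it + min (D - ones).toNat ((table.drop it).takeWhile (fun s => s == "1")).length,
       ones + (min (D - ones).toNat ((table.drop it).takeWhile (fun s => s == "1")).length : Nat)) := by
  fun_induction fLoop2 table D it ones with
  | case1 it ones h ih =>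
    obtain ⟨hD, hlt, heq⟩ := h
    rw [ih]
    rw [List.getD_eq_getElem table "" hlt] at heq
    have heq' : (table[it] == "1") = true := by simpa using heq
    rw [List.drop_eq_getElem_cons hlt, List.takeWhile_cons, heq']
    simp only [if_true, List.length_cons]
    have h1 : (D - ones).toNat = (D - (ones + 1)).toNat + 1 := by omega
    rw [h1, Nat.succ_min_succ]
    refine Prod.ext ?_ ?_
    · simp only; omega
    · simp only; push_cast; ring
  | case2 it ones h =>
    by_cases hD : ones < D
    · by_cases hlt : it < table.length
      · have hx : ¬ table.getD it "" = "1" := by tauto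
        rw [List.getD_eq_getElem table "" hlt] at hx
        have hx' : (table[it] == "1") = false := by simpa using hx
        rw [List.drop_eq_getElem_cons hlt, List.takeWhile_cons, hx']
        simp
      · rw [List.drop_eq_nil_iff.mpr (by omega)]
        simp
    · have h0 : (D - ones).toNat = 0 := by omega
      simp [h0]

theorem loop3_eq (table : List String) (D : Int) (it : Nat) (ones : Int) :
    fLoop3 table D it ones =
      (((table.drop it).all (fun s => !(s == "1"))) && (D == ones)) := by
  fun_induction fLoop3 table D it ones with
  | case1 it h heq =>
    rw [List.getD_eq_getElem table "" h] at heq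
    have heq' : (table[it] == "1") = true := by simpa using heq
    rw [List.drop_eq_getElem_cons h, List.all_cons, heq']
    simp
  | case2 it h hne ih =>
    rw [ih]
    rw [List.getD_eq_getElem table "" h] at hne
    have hne' : (table[it] == "1") = false := by simpa using hne
    rw [List.drop_eq_getElem_cons h, List.all_cons, hne']
    simp
  | case3 it h =>
    rw [List.drop_eq_nil_iff.mpr (by omega)]
    simp

theorem getLast!_append_right (l1 l2 : List Nat) (h : l2 ≠ []) :
    (l1 ++ l2).getLast! = l2.getLast! := by
  have hdec : l2.dropLast ++ [l2.getLast h] = l2 := List.dropLast_append_getLast h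
  calc (l1 ++ l2).getLast! = (l1 ++ (l2.dropLast ++ [l2.getLast h])).getLast! := by rw [hdec]
    _ = l2.getLast h := by rw [← List.append_assoc]; exact getLast!_concat _ _
    _ = (l2.dropLast ++ [l2.getLast h]).getLast! := (getLast!_concat _ _).symm
    _ = l2.getLast! := by rw [hdec]

theorem posIdx_ge_one (r0 : String) (rt : List String) (h0 : ¬ r0 = "1") :
    ∀ x ∈ posIdx (r0 :: rt), 1 ≤ x := by
  intro x hx
  simp only [posIdx, if_neg h0, List.nil_append, List.mem_map] at hx
  obtain ⟨y, _, hy⟩ := hx; omega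

theorem dropWhile_cons_head (p : String → Bool) (l : List String) (x : String)
    (xs : List String) (h : l.dropWhile p = x :: xs) : p x = false := by
  induction l with
  | nil => simp at h
  | cons y t ih =>
    rw [List.dropWhile_cons] at h
    by_cases hy : p y = true
    · rw [if_pos hy] at h; exact ih h
    · rw [if_neg hy] at h
      have : y = x := (List.cons.injEq y t x xs ▸ h).1
      rw [← this]
      simpa using hy

-- ===== VERDICT (by name: the statement is the Claim_ definition above) =====
theorem f_spec : Claim_equal_f := by
  intro table D _
  unfold Spec_f
  have hf : f table D = fLoop3 table D (fLoop2 table D (fLoop1 table D 0) 0).1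
      (fLoop2 table D (fLoop1 table D 0) 0).2 := rfl
  have hfa : f_alt table D =
      (if ((posIdx table).length : Int) ≠ D then false
       else if (posIdx table).length = 0 then true
       else ((posIdx table).getLast! - (posIdx table).head! + 1 == (posIdx table).length)) := by
    unfold f_alt
    rw [posIdx_filter_range]
  rw [hf, hfa, loop1_eq, loop2_eq, loop3_eq, List.drop_zero]
  by_cases hD : 0 < D
  · -- decomposition table = t1 ++ replicate b "1" ++ rest
    set t1 := table.takeWhile (fun s => !(s == "1")) with ht1
    set rs := table.dropWhile (fun s => !(s == "1")) with hrs
    set a := t1.length with ha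
    set ons := rs.takeWhile (fun s => (s == "1")) with hons
    set b := ons.length with hb
    set rest := rs.dropWhile (fun s => (s == "1")) with hrest
    set q := posIdx rest with hq
    set m := q.length with hm
    have hsplit : t1 ++ rs = table := List.takeWhile_append_dropWhile
    have hcons : ons = List.replicate b "1" := by
      rw [List.eq_replicate_iff]
      refine ⟨hb.symm, fun s hs => ?_⟩
      rw [hons] at hs
      have h1 := List.mem_takeWhile_imp hs
      simp only [beq_iff_eq] at h1
      exact h1
    have hrs_eq : rs = List.replicate b "1" ++ rest := by
      conv_lhs => rw [← List.takeWhile_append_dropWhile (p := fun s => (s == "1")) (l := rs)]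
      rw [← hcons]
    have ht : table = t1 ++ (List.replicate b "1" ++ rest) := by
      rw [← hrs_eq, hsplit]
    have hposT1 : posIdx t1 = [] := by
      rw [posIdx_nil_iff]
      rw [List.all_eq_true]
      intro s hs
      rw [ht1] at hs
      exact List.mem_takeWhile_imp (p := fun s => !(s == "1")) hs
    have hpos : posIdx table = (List.range b).map (· + a) ++ q.map (· + (a + b)) := by
      conv_lhs => rw [ht]
      rw [posIdx_append, hposT1, posIdx_append, posIdx_replicate, List.nil_append,
        List.map_append, List.map_map, List.length_replicate, ← ha]
      all_goals try congr 1
      all_goals try congr 1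
      all_goals (funext i; simp only [Function.comp_apply]; omega)
    have hlen : (posIdx table).length = b + m := by
      rw [hpos]; simp [hm]
    have hdrop_a : table.drop a = List.replicate b "1" ++ rest := by
      conv_lhs => rw [ht, ha]
      exact List.drop_left
    have htake_a : (table.drop a).takeWhile (fun s => (s == "1")) = ons := by
      rw [hdrop_a, ← hrs_eq]
    have hD0 : (D - 0).toNat = D.toNat := by omega
    rw [if_pos hD, Nat.zero_add, hD0, htake_a, ← hb]
    by_cases hk : D.toNat < b
    · -- second loop stops with a '1' still in sight: third loop sees it
      have hkmin : min D.toNat b = D.toNat := by omega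
      rw [hkmin]
      have hdrop2 : table.drop (a + D.toNat) = List.replicate (b - D.toNat) "1" ++ rest := by
        rw [← List.drop_drop, hdrop_a, List.drop_append_of_le_length (by simp; omega),
          List.drop_replicate]
      have hbk : b - D.toNat = (b - D.toNat - 1) + 1 := by omega
      have hcount : (((posIdx table).length : Int) ≠ D) := by
        rw [hlen]; push_cast; omega
      rw [if_pos hcount]
      dsimp only
      rw [hdrop2, hbk, List.replicate_succ]
      simp
    · -- the whole block of b ones is consumed
      have hkmin : min D.toNat b = b := by omega
      rw [hkmin]
      have hdrop2 : table.drop (a + b) = rest := by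
        have h1 := List.drop_left (l₁ := (List.replicate b "1" : List String)) (l₂ := rest)
        rw [List.length_replicate] at h1
        rw [← List.drop_drop, hdrop_a, h1]
      dsimp only
      rw [hdrop2]
      by_cases hm0 : m = 0
      · -- no ones after the block: both reduce to D == b
        have hq0 : q = [] := List.eq_nil_of_length_eq_zero (hm ▸ hm0)
        have hall : rest.all (fun s => !(s == "1")) = true := by
          rw [← posIdx_nil_iff, ← hq]; exact hq0
        rw [hall, Bool.true_and]
        by_cases hbD : (b : Int) = D
        · have hb1 : 1 ≤ b := by omega
          have hcount : ¬ (((posIdx table).length : Int) ≠ D) := by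
            rw [hlen, hm0]; push_cast; omega
          rw [if_neg hcount]
          have hne0 : ¬ (posIdx table).length = 0 := by
            rw [hlen]; omega
          rw [if_neg hne0]
          have hb' : b = (b - 1) + 1 := by omega
          have hposv : posIdx table = (List.range (b - 1)).map (· + a) ++ [(b - 1) + a] := by
            rw [hpos, hq0, List.map_nil, List.append_nil]
            conv_lhs => rw [hb']
            rw [List.range_succ, List.map_append]
            simp
          have hlast : (posIdx table).getLast! = (b - 1) + a := by
            rw [hposv]; exact getLast!_concat _ _
          have hhead : (posIdx table).head! = a := by
            rw [hpos, hq0, List.map_nil, List.append_nil]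
            conv_lhs => rw [hb']
            rw [List.range_succ_eq_map, List.map_cons]
            simp
          rw [hlast, hhead, hlen]
          have h1 : (b - 1) + a - a + 1 = b + m := by omega
          rw [h1]
          have h2 : (D == 0 + (b : Int)) = true := by
            rw [beq_iff_eq]; omega
          rw [h2]
          simp
        · have hcount : (((posIdx table).length : Int) ≠ D) := by
            rw [hlen, hm0]; push_cast; omega
          rw [if_pos hcount]
          have h2 : (D == 0 + (b : Int)) = false := by
            rw [beq_eq_false_iff_ne]; omega
          rw [h2]
      · -- a stray '1' after the block: both sides are false
        have hqne : q ≠ [] := fun h => hm0 (by rw [hm, h]; rfl)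
        have hrestne : rest ≠ [] := by
          intro h
          apply hqne
          rw [hq, h]
          simp [posIdx]
        have hall : rest.all (fun s => !(s == "1")) = false := by
          cases h : rest.all (fun s => !(s == "1")) with
          | false => rfl
          | true => exact absurd (hq.trans ((posIdx_nil_iff rest).mpr h)) hqne
        rw [hall, Bool.false_and]
        by_cases hcount : (((posIdx table).length : Int) ≠ D)
        · rw [if_pos hcount]
        · rw [if_neg hcount]
          have hne0 : ¬ (posIdx table).length = 0 := by
            rw [hlen]; omega
          rw [if_neg hne0]
          obtain ⟨r0, rt, hrc⟩ := List.exists_cons_of_ne_nil hrestne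
          have hr0 : (r0 == "1") = false :=
            dropWhile_cons_head (fun s => (s == "1")) rs r0 rt (hrest.symm.trans hrc)
          have hr0' : ¬ r0 = "1" := by simpa using hr0
          have hge1 : ∀ x ∈ q, 1 ≤ x := by
            rw [hq, hrc]
            exact posIdx_ge_one r0 rt hr0'
          have hpw : q.Pairwise (· < ·) := hq ▸ posIdx_pairwise rest
          have hrsne : rs ≠ [] := by
            rw [hrs_eq]
            intro h
            exact hrestne (List.append_eq_nil_iff.mp h).2
          have hb1 : 1 ≤ b := by
            obtain ⟨s0, st, hsc⟩ := List.exists_cons_of_ne_nil hrsne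
            have hs0 : (!(s0 == "1")) = false :=
              dropWhile_cons_head (fun s => !(s == "1")) table s0 st (hrs.symm.trans hsc)
            have hs0' : (s0 == "1") = true := by simpa using hs0
            rw [hb, hons, hsc, List.takeWhile_cons, hs0']
            simp
          have hb' : b = (b - 1) + 1 := by omega
          have hhead : (posIdx table).head! = a := by
            rw [hpos]
            conv_lhs => rw [hb']
            rw [List.range_succ_eq_map, List.map_cons]
            simp
          have hql : m ≤ q.getLast hqne := by
            obtain ⟨q0, qt, hq0⟩ := List.exists_cons_of_ne_nil hqne
            have hch := chain_last qt q0 (hq0 ▸ hpw)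
            have hq01 : 1 ≤ q0 := hge1 q0 (by rw [hq0]; simp)
            have hlen' : m = qt.length + 1 := by rw [hm, hq0]; rfl
            have heq : (q0 :: qt).getLast (List.cons_ne_nil q0 qt) = q.getLast hqne := by
              congr 1
              exact hq0.symm
            omega
          have hlast : (posIdx table).getLast! = q.getLast hqne + (a + b) := by
            rw [hpos]
            rw [getLast!_append_right _ _ (by simp [hqne])]
            conv_lhs => rw [← List.dropLast_append_getLast hqne, List.map_append]
            simp only [List.map_cons, List.map_nil]
            exact getLast!_concat _ _
          rw [hhead, hlast, hlen]
          have hne : ¬ (q.getLast hqne + (a + b) - a + 1 = b + m) := by omega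
          rw [beq_eq_false_iff_ne.mpr hne]
  · -- D ≤ 0 : no one is ever consumed; answer is "no ones at all and D = 0"
    rw [if_neg hD]
    have hD0 : (D - 0).toNat = 0 := by omega
    rw [hD0, Nat.zero_min]
    dsimp only
    rw [List.drop_zero]
    by_cases hq0 : posIdx table = []
    · have hall : table.all (fun s => !(s == "1")) = true := (posIdx_nil_iff table).mp hq0
      rw [hall, Bool.true_and, hq0]
      by_cases hDz : D = 0
      · subst hDz; simp
      · have hc : ((([] : List Nat).length : Int) ≠ D) := by simp; omega
        rw [if_pos hc]
        have : (D == ((0 : Int) + (0 : Nat))) = false := by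
          rw [beq_eq_false_iff_ne]
          push_cast; omega
        rw [this]
    · have hall : table.all (fun s => !(s == "1")) = false := by
        cases h : table.all (fun s => !(s == "1")) with
        | false => rfl
        | true => exact absurd ((posIdx_nil_iff table).mpr h) hq0
      rw [hall, Bool.false_and]
      have hlen1 : 1 ≤ (posIdx table).length := by
        cases h : posIdx table with
        | nil => exact absurd h hq0
        | cons x t => simp
      have hc : (((posIdx table).length : Int) ≠ D) := by omega
      rw [if_pos hc]
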